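-- pv_equiv track=rewrite | github.com/dhaase-de/dh-skel | utils/bin/pwp.py | format_numbers_above
-- ===== SOURCE A (Python) =====
-- import math
--
-- def chunkify(x, size):
--     """
--     http://stackoverflow.com/a/312464/1913780
--     """
--     for n_from in range(0, len(x), size):
--         yield x[n_from:(n_from + size)]
--
-- def format_numbers_above(input_text, width):
--     # params
--     characters_per_chunk = 4
--     chunk_sep = "  "
--
--     # split text
--     chunks = tuple(chunkify(x=input_text, size=characters_per_chunk))
--     chunk_count = len(chunks)
--
--     chunks_per_line = max(1, math.floor(((width - 13) + len(chunk_sep)) / (characters_per_chunk + len(chunk_sep))))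
--     line_count = math.ceil(chunk_count / chunks_per_line)
--
--     lines_upper = []
--     lines_lower = []
--
--     for n_line in range(line_count):
--         current_line_upper = ""
--         current_line_lower = ""
--
--         for n_chunk in range(n_line * chunks_per_line, (n_line + 1) * chunks_per_line):
--             if n_chunk >= chunk_count:
--                 # all chunks done, finished
--                 break
--             chunk = chunks[n_chunk]
--
--             if len(current_line_lower) > 0:
--                 # add separator, but not for the first chunk on a line
--                 current_line_upper += chunk_sep
--                 current_line_lower += chunk_sep
--
--             # text for the upper line
--             chunk_text_upper = "_" * len(chunk)
--             character_str = str(n_chunk * characters_per_chunk + 1)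
--             if len(character_str) < len(chunk_text_upper):
--                 chunk_text_upper = character_str + chunk_text_upper[len(character_str):]
--
--             current_line_upper += chunk_text_upper
--             current_line_lower += chunk
--
--         lines_upper.append(current_line_upper)
--         lines_lower.append(current_line_lower)
--
--     # interweave upper and lower lines
--     text = ""
--     for (n_line, (line_upper, line_lower)) in enumerate(zip(lines_upper, lines_lower)):
--         line_prefix = f"  {n_line * chunks_per_line * characters_per_chunk + 1: >4d}-{min(len(input_text), (n_line + 1) * chunks_per_line * characters_per_chunk): <4d}  "
--
--         text += "\n"
--         text += " " * len(line_prefix) + line_upper + "\n"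
--         text += line_prefix + line_lower + "\n"
--
--     return text
-- ===== SOURCE B (Python) =====
-- def format_numbers_above(input_text, width):
--     # divide and conquer: split the text at a line-aligned midpoint and recurse
--     span = 4 * max(1, (width - 11) // 6)
--     return _fmt(input_text, 0, span)
--
-- def _fmt(text, offset, span):
--     if text == "":
--         return ""
--     if len(text) <= span:
--         # a single display line
--         marks = []
--         chunks = []
--         for i in range(0, len(text), 4):
--             marks.append(_mark(offset + i, len(text[i:i + 4])))
--             chunks.append(text[i:i + 4])
--         prefix = "  " + str(offset + 1).rjust(4) + "-" + \
--                  str(offset + len(text)).ljust(4) + "  "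
--         return ("\n" + " " * len(prefix) + "  ".join(marks) + "\n"
--                 + prefix + "  ".join(chunks) + "\n")
--     lines = -(-len(text) // span)
--     mid = (lines // 2) * span
--     return _fmt(text[:mid], offset, span) + _fmt(text[mid:], offset + mid, span)
--
-- def _mark(offset, n):
--     s = str(offset + 1)
--     return s + "_" * (n - len(s)) if len(s) < n else "_" * n
-- ===== Notes on version B (the rewrite author's own statement) =====
-- stated objective: alternative
-- what changed: B formats by divide and conquer: it recursively splits the text at a line-aligned midpoint and concatenates the two halves' outputs, with a base case that emits one 3-line block directly; A instead builds a chunk tuple, fills two parallel line lists with a nested index loop with break, and interweaves them in a second pass.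
import Mathlib
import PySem

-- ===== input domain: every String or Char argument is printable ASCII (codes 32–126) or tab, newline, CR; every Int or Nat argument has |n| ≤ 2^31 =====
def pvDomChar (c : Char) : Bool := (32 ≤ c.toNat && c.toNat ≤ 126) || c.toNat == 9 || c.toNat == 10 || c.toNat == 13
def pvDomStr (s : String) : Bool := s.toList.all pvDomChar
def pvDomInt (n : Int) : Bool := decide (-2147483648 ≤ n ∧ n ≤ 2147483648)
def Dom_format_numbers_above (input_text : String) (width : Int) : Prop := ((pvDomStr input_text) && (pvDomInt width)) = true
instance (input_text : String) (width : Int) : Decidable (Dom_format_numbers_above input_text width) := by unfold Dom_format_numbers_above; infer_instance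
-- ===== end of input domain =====

-- B formats by divide and conquer: it recursively splits the text at a line-aligned midpoint and
-- concatenates the halves' outputs (base case: one 3-line block), instead of A's chunk tuple,
-- nested index loop with break, and second interweaving pass (objective: alternative).


-- shared tiny formatting helpers: Python's f"{n: >4d}" (= str(n).rjust(4)) and f"{n: <4d}" (= str(n).ljust(4))
def pvRjust4 (s : List Char) : List Char := List.replicate (4 - s.length) ' ' ++ s
def pvLjust4 (s : List Char) : List Char := s ++ List.replicate (4 - s.length) ' '

-- ===== PORT A =====
-- chunkify: the list of slices x[n_from:n_from+size] the generator yields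
def pvA_chunkify (x : List Char) (size : Int) : List (List Char) :=
  (PySem.List.pyRange 0 x.length size).map fun nfrom => PySem.List.slice x (some nfrom) (some (nfrom + size))

-- A's inner 'for n_chunk in range(...)' with its break; state = (current_line_upper, current_line_lower)
def pvA_inner (chunks : List (List Char)) (chunk_count cpc : Int) (sep : List Char) :
    List Int → List Char × List Char → List Char × List Char
  | [], st => st
  | n_chunk :: rest, (cu, cl) =>
    if chunk_count ≤ n_chunk then (cu, cl)    -- break: all chunks done
    else
      let chunk := PySem.List.pyGetD chunks n_chunk []
      let st' := if 0 < cl.length then (cu ++ sep, cl ++ sep) else (cu, cl)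
      let ctu := List.replicate chunk.length '_'
      let cstr := PySem.Int.toChars (n_chunk * cpc + 1)
      -- chunk_text_upper[len(character_str):] — the start index is a Nat, so drop is exact
      let ctu := if cstr.length < ctu.length then cstr ++ ctu.drop cstr.length else ctu
      pvA_inner chunks chunk_count cpc sep rest (st'.1 ++ ctu, st'.2 ++ chunk)

def format_numbers_above (input_text : String) (width : Int) : String :=
  let cpc : Int := 4
  let chunk_sep : List Char := "  ".toList
  let x := input_text.toList
  let chunks := pvA_chunkify x cpc
  let chunk_count : Int := chunks.length
  -- math.floor(((width-13)+len(sep)) / (cpc+len(sep))): the float division is exact for |width| ≤ 2^31, = floor division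
  let chunks_per_line := max 1 (PySem.Int.floordiv ((width - 13) + (chunk_sep.length : Int)) (cpc + (chunk_sep.length : Int)))
  -- math.ceil(chunk_count / chunks_per_line): exact for these magnitudes, = -((-chunk_count) // cpl)
  let line_count := -(PySem.Int.floordiv (-chunk_count) chunks_per_line)
  let lines := (PySem.List.pyRange 0 line_count 1).foldl
    (fun (st : List (List Char) × List (List Char)) n_line =>
      let p := pvA_inner chunks chunk_count cpc chunk_sep
        (PySem.List.pyRange (n_line * chunks_per_line) ((n_line + 1) * chunks_per_line) 1) ([], [])
      (st.1 ++ [p.1], st.2 ++ [p.2])) ([], [])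
  -- interweave upper and lower lines
  let text := ((PySem.List.enumerate (lines.1.zip lines.2))).foldl
    (fun text (e : Int × (List Char × List Char)) =>
      let line_prefix := "  ".toList ++ pvRjust4 (PySem.Int.toChars (e.1 * chunks_per_line * cpc + 1))
        ++ ['-'] ++ pvLjust4 (PySem.Int.toChars (min (x.length : Int) ((e.1 + 1) * chunks_per_line * cpc))) ++ "  ".toList
      let text := text ++ ['\n']
      let text := text ++ (List.replicate line_prefix.length ' ' ++ e.2.1 ++ ['\n'])
      text ++ (line_prefix ++ e.2.2 ++ ['\n'])) []
  String.ofList text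

-- ===== PORT B =====
-- ceiling division, cited by pvB_fmt's termination argument: -((-cc) // d) = (cc + d - 1) / d
theorem pvCeil_eq (cc d : Int) (hd : 0 < d) :
    -(PySem.Int.floordiv (-cc) d) = (cc + d - 1) / d := by
  rw [PySem.Int.floordiv_eq_ediv_of_pos hd]
  have h1 := Int.mul_ediv_add_emod (-cc) d
  have h2 := Int.emod_nonneg (-cc) (by omega : d ≠ 0)
  have h3 := Int.emod_lt_of_pos (-cc) hd
  have h4 := Int.mul_ediv_add_emod (cc + d - 1) d
  have h5 := Int.emod_nonneg (cc + d - 1) (by omega : d ≠ 0)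
  have h6 := Int.emod_lt_of_pos (cc + d - 1) hd
  set u := (-cc) / d with hu
  set v := (cc + d - 1) / d with hv
  have huv : u + v = 0 := by nlinarith [sq_nonneg (u + v)]
  omega

-- _mark: str(offset+1) laid over a run of n underscores
def pvB_mark (offset : Int) (n : Nat) : List Char :=
  let s := PySem.Int.toChars (offset + 1)
  if s.length < n then s ++ List.replicate (n - s.length) '_' else List.replicate n '_'

-- the single-line base case: one 3-line block for text t starting at character offset
def pvB_lineBlock (t : List Char) (offset : Int) : List Char :=
  let ml := (PySem.List.pyRange 0 t.length 4).foldl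
    (fun (st : List (List Char) × List (List Char)) i =>
      (st.1 ++ [pvB_mark (offset + i) (PySem.List.slice t (some i) (some (i + 4))).length],
       st.2 ++ [PySem.List.slice t (some i) (some (i + 4))])) ([], [])
  let pre := "  ".toList ++ pvRjust4 (PySem.Int.toChars (offset + 1)) ++ ['-']
    ++ pvLjust4 (PySem.Int.toChars (offset + t.length)) ++ "  ".toList
  ['\n'] ++ List.replicate pre.length ' ' ++ PySem.Chars.join "  ".toList ml.1 ++ ['\n']
    ++ pre ++ PySem.Chars.join "  ".toList ml.2 ++ ['\n']

-- _fmt: divide and conquer on the text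
def pvB_fmt (t : List Char) (offset span : Int) : List Char :=
  if h0 : t = [] then []
  else if h1 : (t.length : Int) ≤ span then pvB_lineBlock t offset
  else if h2 : span ≤ 0 then []    -- unreachable totality guard: span = 4*cpl ≥ 4 at every call
  else
    let lines := -(PySem.Int.floordiv (-(t.length : Int)) span)
    let mid := (PySem.Int.floordiv lines 2) * span
    -- here 0 < mid < len(t), so Python's text[:mid] / text[mid:] are exactly take/drop
    pvB_fmt (t.take mid.toNat) offset span ++ pvB_fmt (t.drop mid.toNat) (offset + mid) span
termination_by t.length
decreasing_by
  all_goals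
    rw [pvCeil_eq _ _ (by omega), PySem.Int.floordiv_eq_ediv_of_pos (by norm_num : (0:Int) < 2)]
    set L : Int := (t.length : Int) with hL
    have hsp : 0 < span := by omega
    have hLs : span < L := by omega
    set q : Int := (L + span - 1) / span with hq
    have hub : q * span ≤ L + span - 1 := Int.ediv_mul_le _ (by omega)
    have h2le : 2 ≤ q := by
      rw [hq]
      exact (Int.le_ediv_iff_mul_le hsp).mpr (by omega)
    have hmid1 : span ≤ q / 2 * span := by
      have : 1 ≤ q / 2 := by omega
      nlinarith
    have hmid2 : q / 2 * span ≤ L - 1 := by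
      have hh : q / 2 ≤ q - 1 := by omega
      have := mul_le_mul_of_nonneg_right hh (le_of_lt hsp)
      nlinarith
    simp only [List.length_take, List.length_drop]
    omega

def format_numbers_above_alt (input_text : String) (width : Int) : String :=
  String.ofList (pvB_fmt input_text.toList 0 (4 * max 1 (PySem.Int.floordiv (width - 11) 6)))

-- ===== PRECONDITION & SPEC =====
def Spec_format_numbers_above (input_text : String) (width : Int) (out : String) : Prop := out = format_numbers_above_alt input_text width
instance (input_text : String) (width : Int) (out : String) : Decidable (Spec_format_numbers_above input_text width out) := by unfold Spec_format_numbers_above; infer_instance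

-- ===== CLAIM (what is proved, stated in full; the proofs are below) =====
def Claim_equal_format_numbers_above : Prop := ∀ (input_text : String) (width : Int), Dom_format_numbers_above input_text width → Spec_format_numbers_above input_text width (format_numbers_above input_text width)

-- ===== LEMMAS AND PROOFS =====

-- proof-side canonical form: the per-line blocks of the output, listed left to right
def pvB_numOver (num : List Char) (n : Nat) : List Char :=
  if num.length < n then num ++ List.replicate (n - num.length) '_' else List.replicate n '_'

def pvB_block (x : List Char) (chunks : List (List Char)) (cpc cpl : Int) (sep : List Char) (g : Int) : List Char :=
  let group := PySem.List.slice chunks (some g) (some (g + cpl))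
  let lower := PySem.Chars.join sep group
  let upper := PySem.Chars.join sep ((PySem.List.enumerate group).map fun jc => pvB_numOver (PySem.Int.toChars ((g + jc.1) * cpc + 1)) jc.2.length)
  let pre := "  ".toList ++ pvRjust4 (PySem.Int.toChars (g * cpc + 1)) ++ ['-']
    ++ pvLjust4 (PySem.Int.toChars (min (x.length : Int) ((g + cpl) * cpc))) ++ "  ".toList
  ['\n'] ++ List.replicate pre.length ' ' ++ upper ++ ['\n'] ++ pre ++ lower ++ ['\n']

def pvSliced (x : List Char) (w : Int) : List Char :=
  let chunks := pvA_chunkify x 4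
  let cpl := max 1 (PySem.Int.floordiv (w - 11) 6)
  ((PySem.List.pyRange 0 chunks.length cpl).map (pvB_block x chunks 4 cpl "  ".toList)).flatten

-- sep prepended before each piece (what join does after its first piece)
def pvPreJoin (sep : List Char) (l : List (List Char)) : List Char := (l.map (sep ++ ·)).flatten

theorem pvJoin_cons (sep c : List Char) (l : List (List Char)) :
    PySem.Chars.join sep (c :: l) = c ++ pvPreJoin sep l := by
  induction l generalizing c with
  | nil => simp [PySem.Chars.join_singleton, pvPreJoin]
  | cons d t ih => rw [PySem.Chars.join_cons_cons, ih d]; simp [pvPreJoin]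

-- every chunk A slices off is a nonempty list
theorem pvChunk_ne_nil (x : List Char) (c : List Char) (h : c ∈ pvA_chunkify x 4) : c ≠ [] := by
  unfold pvA_chunkify at h
  obtain ⟨i, hi, rfl⟩ := List.mem_map.mp h
  rw [PySem.List.mem_pyRange_iff_of_pos (by norm_num)] at hi
  rw [PySem.List.slice_toNat x (a := i) (b := i + 4) (by omega) (by omega)]
  intro hnil
  have := congrArg List.length hnil
  simp at this
  omega

-- A's upper-line text for one chunk is the num-over-underscores helper
theorem pvNumOver_eq (cstr : List Char) (n : Nat) :
    (if cstr.length < (List.replicate n '_').length then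
        cstr ++ (List.replicate n '_').drop cstr.length
      else List.replicate n '_') = pvB_numOver cstr n := by
  simp [pvB_numOver, List.drop_replicate]

theorem pvInner_append (chunks : List (List Char)) (cc cpc : Int) (sep : List Char)
    (l1 l2 : List Int) (st : List Char × List Char) (h : ∀ n ∈ l1, n < cc) :
    pvA_inner chunks cc cpc sep (l1 ++ l2) st =
      pvA_inner chunks cc cpc sep l2 (pvA_inner chunks cc cpc sep l1 st) := by
  induction l1 generalizing st with
  | nil => simp [pvA_inner]
  | cons n t ih =>
    obtain ⟨cu, cl⟩ := st
    have hn : ¬ cc ≤ n := by have := h n (by simp); omega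
    simp only [List.cons_append, pvA_inner, hn, if_false]
    exact ih _ (fun m hm => h m (by simp [hm]))

-- full processing of consecutive indices g..e-1 (all < cc) from a nonempty accumulator
theorem pvInner_run (chunks : List (List Char)) (sep : List Char)
    (g e : Int) (he : e ≤ (chunks.length : Int)) (cu cl : List Char) (hcl : cl ≠ []) :
    pvA_inner chunks (chunks.length : Int) 4 sep (PySem.List.pyRange g e 1) (cu, cl) =
      (cu ++ pvPreJoin sep ((PySem.List.pyRange g e 1).map fun n =>
          pvB_numOver (PySem.Int.toChars (n * 4 + 1)) (PySem.List.pyGetD chunks n []).length),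
       cl ++ pvPreJoin sep ((PySem.List.pyRange g e 1).map fun n => PySem.List.pyGetD chunks n [])) := by
  rcases lt_or_ge g e with hlt | hge
  · rw [PySem.List.pyRange_one_cons hlt]
    have hbrk : ¬ ((chunks.length : Int) ≤ g) := by omega
    have hpos : 0 < cl.length := List.length_pos_iff.mpr hcl
    simp only [pvA_inner, hbrk, if_false, hpos, if_true]
    rw [pvNumOver_eq]
    rw [pvInner_run chunks sep (g + 1) e he _ _ (by simp [hcl])]
    simp [pvPreJoin, List.append_assoc]
  · rw [PySem.List.pyRange_one_eq_nil (by omega)]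
    simp [pvA_inner, pvPreJoin]
termination_by (e - g).toNat
decreasing_by omega

-- starting from the empty accumulators one gets the joined group
theorem pvInner_start (chunks : List (List Char)) (sep : List Char)
    (hchunks : ∀ c ∈ chunks, c ≠ [])
    (g e : Int) (hg : 0 ≤ g) (hlt : g < e) (he : e ≤ (chunks.length : Int)) :
    pvA_inner chunks (chunks.length : Int) 4 sep (PySem.List.pyRange g e 1) ([], []) =
      (PySem.Chars.join sep ((PySem.List.pyRange g e 1).map fun n =>
          pvB_numOver (PySem.Int.toChars (n * 4 + 1)) (PySem.List.pyGetD chunks n []).length),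
       PySem.Chars.join sep ((PySem.List.pyRange g e 1).map fun n => PySem.List.pyGetD chunks n [])) := by
  rw [PySem.List.pyRange_one_cons hlt]
  have hbrk : ¬ ((chunks.length : Int) ≤ g) := by omega
  have hne : PySem.List.pyGetD chunks g [] ≠ [] :=
    hchunks _ (PySem.List.pyGetD_mem chunks (d := []) (by constructor <;> omega))
  simp only [pvA_inner, hbrk, if_false, List.length_nil, lt_irrefl, List.nil_append]
  rw [pvNumOver_eq]
  rw [pvInner_run chunks sep (g + 1) e he _ _ hne]
  simp [List.map_cons, pvJoin_cons]

-- enumerate over a mapped integer range carries the range element shifted into the index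
theorem pvEnum_map_pyRange {α : Type} (f : Int → α) (a b s : Int) :
    PySem.List.enumerate ((PySem.List.pyRange a b 1).map f) s =
      (PySem.List.pyRange a b 1).map (fun m => (s + (m - a), f m)) := by
  rcases lt_or_ge a b with hlt | hge
  · rw [PySem.List.pyRange_one_cons hlt]
    simp only [List.map_cons, PySem.List.enumerate_cons]
    rw [pvEnum_map_pyRange f (a + 1) b (s + 1)]
    congr 1
    · simp
    · apply List.map_congr_left
      intro m _
      simp only [Prod.mk.injEq, and_true]
      ring
  · rw [PySem.List.pyRange_one_eq_nil (by omega)]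
    simp
termination_by (b - a).toNat
decreasing_by omega

-- a slice of the chunk list is the list of its elements at the clamped index range
theorem pvGroup_eq (chunks : List (List Char)) (g c : Int) (hg : 0 ≤ g) (hc : 0 ≤ c) :
    PySem.List.slice chunks (some g) (some (g + c)) =
      (PySem.List.pyRange g (min (g + c) (chunks.length : Int)) 1).map
        (fun m => PySem.List.pyGetD chunks m []) := by
  rw [PySem.List.slice_toNat chunks (a := g) (b := g + c) hg (by omega)]
  apply List.ext_getElem
  · simp [PySem.List.length_pyRange_one]
    omega
  · intro k h1 h2
    simp only [List.getElem_take, List.getElem_drop, List.getElem_map]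
    rw [PySem.List.getElem_pyRange_one]
    rw [PySem.List.pyGetD_eq_getElem _ _ (by omega) (by
      simp [PySem.List.length_pyRange_one] at h2; omega)]
    congr 1
    simp [PySem.List.length_pyRange_one] at h2
    omega

-- one line of A's output equals the canonical block for the group starting at chunk index n*cpl
theorem pvBlock_eq (x : List Char) (chunks : List (List Char))
    (hchunks : ∀ c ∈ chunks, c ≠ []) (cpl : Int) (hcpl : 0 < cpl)
    (n : Int) (hn0 : 0 ≤ n) (hlt : n * cpl < (chunks.length : Int)) :
    (let p := pvA_inner chunks (chunks.length : Int) 4 "  ".toList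
        (PySem.List.pyRange (n * cpl) ((n + 1) * cpl) 1) ([], [])
     let pre := "  ".toList ++ pvRjust4 (PySem.Int.toChars (n * cpl * 4 + 1)) ++ ['-']
       ++ pvLjust4 (PySem.Int.toChars (min (x.length : Int) ((n + 1) * cpl * 4))) ++ "  ".toList
     ['\n'] ++ (List.replicate pre.length ' ' ++ p.1 ++ ['\n']) ++ (pre ++ p.2 ++ ['\n']))
    = pvB_block x chunks 4 cpl "  ".toList (n * cpl) := by
  have hg0 : 0 ≤ n * cpl := by positivity
  set cc : Int := (chunks.length : Int) with hcc
  set g : Int := n * cpl with hgdef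
  set e : Int := min (g + cpl) cc with hedef
  have hge : g < e := by omega
  have hee : e ≤ cc := by omega
  have hsplit : PySem.List.pyRange g ((n + 1) * cpl) 1 =
      PySem.List.pyRange g e 1 ++ PySem.List.pyRange e ((n + 1) * cpl) 1 := by
    have hnc : (n + 1) * cpl = g + cpl := by ring
    apply PySem.List.pyRange_one_append <;> omega
  have hrest : ∀ st, pvA_inner chunks cc 4 "  ".toList (PySem.List.pyRange e ((n + 1) * cpl) 1) st = st := by
    intro st
    by_cases hcase : e = (n + 1) * cpl
    · rw [← hcase, PySem.List.pyRange_one_eq_nil (by omega)]; rfl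
    · have hecc : e = cc := by
        have : (n+1)*cpl = g + cpl := by ring
        omega
      have hlt2 : e < (n + 1) * cpl := by
        have : (n+1)*cpl = g + cpl := by ring
        omega
      rw [PySem.List.pyRange_one_cons hlt2]
      obtain ⟨cu, cl⟩ := st
      simp [pvA_inner, hecc.symm.le]
  have hA : pvA_inner chunks cc 4 "  ".toList (PySem.List.pyRange g ((n + 1) * cpl) 1) ([], []) =
      (PySem.Chars.join "  ".toList ((PySem.List.pyRange g e 1).map fun m =>
          pvB_numOver (PySem.Int.toChars (m * 4 + 1)) (PySem.List.pyGetD chunks m []).length),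
       PySem.Chars.join "  ".toList ((PySem.List.pyRange g e 1).map fun m => PySem.List.pyGetD chunks m [])) := by
    rw [hsplit, pvInner_append _ _ _ _ _ _ _ (by
      intro m hm
      rw [PySem.List.mem_pyRange_one] at hm
      omega)]
    rw [hrest, pvInner_start chunks _ hchunks g e (by omega) hge hee]
  unfold pvB_block
  dsimp only
  rw [pvGroup_eq chunks g cpl (by omega) (by omega)]
  rw [pvEnum_map_pyRange]
  rw [hA]
  dsimp only
  simp only [List.map_map]
  simp only [Function.comp_def]
  have harg : ((PySem.List.pyRange g (min (g + cpl) (chunks.length : Int)) 1).map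
        (fun m => pvB_numOver (PySem.Int.toChars ((g + (0 + (m - g))) * 4 + 1)) (PySem.List.pyGetD chunks m []).length))
      = ((PySem.List.pyRange g (min (g + cpl) (chunks.length : Int)) 1).map
        (fun m => pvB_numOver (PySem.Int.toChars (m * 4 + 1)) (PySem.List.pyGetD chunks m []).length)) := by
    apply List.map_congr_left
    intro m _
    congr 2
    ring
  have h1 : n * cpl * 4 + 1 = g * 4 + 1 := by rw [hgdef]
  have h2 : (n + 1) * cpl * 4 = (g + cpl) * 4 := by rw [hgdef]; ring
  rw [h1, h2]
  rw [harg]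
  simp [List.append_assoc]
  rfl

-- A equals the canonical block list
set_option maxHeartbeats 2000000 in
theorem pvA_eq_sliced (s : String) (w : Int) :
    format_numbers_above s w = String.ofList (pvSliced s.toList w) := by
  unfold format_numbers_above pvSliced
  dsimp only
  set x := s.toList with hx
  rw [show (List.length (String.toList "  ")) = 2 from rfl]
  rw [show (w - 13 + ((2 : Nat) : Int)) = w - 11 from by omega]
  rw [show ((4 : Int) + ((2 : Nat) : Int)) = 6 from by norm_num]
  set chunks := pvA_chunkify x 4 with hchdef
  have hchunks : ∀ c ∈ chunks, c ≠ [] := fun c hc => pvChunk_ne_nil x c hc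
  set cpl : Int := max 1 (PySem.Int.floordiv (w - 11) 6) with hcpldef
  have hcpl : 0 < cpl := lt_of_lt_of_le zero_lt_one (le_max_left _ _)
  set cc : Int := (chunks.length : Int) with hccdef
  have hcc0 : 0 ≤ cc := by positivity
  set L : Int := -(PySem.Int.floordiv (-cc) cpl) with hLdef
  rw [PySem.List.foldl_prod_mk
      (f := fun st1 n_line => st1 ++ [(pvA_inner chunks cc 4 "  ".toList (PySem.List.pyRange (n_line * cpl) ((n_line + 1) * cpl) 1) ([], [])).1])
      (g := fun st2 n_line => st2 ++ [(pvA_inner chunks cc 4 "  ".toList (PySem.List.pyRange (n_line * cpl) ((n_line + 1) * cpl) 1) ([], [])).2])]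
  dsimp only
  rw [PySem.List.foldl_append_singleton_eq_map, PySem.List.foldl_append_singleton_eq_map]
  dsimp only [List.nil_append]
  rw [List.zip_map']
  rw [pvEnum_map_pyRange]
  simp only [zero_add, sub_zero]
  rw [show (fun (text : List Char) (e : Int × (List Char × List Char)) =>
        text ++ ['\n'] ++ (List.replicate ("  ".toList ++ pvRjust4 (PySem.Int.toChars (e.1 * cpl * 4 + 1)) ++ ['-'] ++ pvLjust4 (PySem.Int.toChars (min ((x.length : Int)) ((e.1 + 1) * cpl * 4))) ++ "  ".toList).length ' ' ++ e.2.1 ++ ['\n']) ++ ("  ".toList ++ pvRjust4 (PySem.Int.toChars (e.1 * cpl * 4 + 1)) ++ ['-'] ++ pvLjust4 (PySem.Int.toChars (min ((x.length : Int)) ((e.1 + 1) * cpl * 4))) ++ "  ".toList ++ e.2.2 ++ ['\n']))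
      = (fun (text : List Char) (e : Int × (List Char × List Char)) =>
        text ++ (['\n'] ++ (List.replicate ("  ".toList ++ pvRjust4 (PySem.Int.toChars (e.1 * cpl * 4 + 1)) ++ ['-'] ++ pvLjust4 (PySem.Int.toChars (min ((x.length : Int)) ((e.1 + 1) * cpl * 4))) ++ "  ".toList).length ' ' ++ e.2.1 ++ ['\n']) ++ ("  ".toList ++ pvRjust4 (PySem.Int.toChars (e.1 * cpl * 4 + 1)) ++ ['-'] ++ pvLjust4 (PySem.Int.toChars (min ((x.length : Int)) ((e.1 + 1) * cpl * 4))) ++ "  ".toList ++ e.2.2 ++ ['\n'])))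
    from by funext t e; simp [List.append_assoc]]
  rw [PySem.List.foldl_append_eq_flatMap]
  dsimp only [List.nil_append]
  rw [List.flatMap_def, List.map_map]
  rw [PySem.List.pyRange_of_pos 0 L one_pos, PySem.List.pyRange_of_pos 0 cc hcpl]
  rw [List.map_map, List.map_map]
  have hL : L = (cc + cpl - 1) / cpl := by rw [hLdef, pvCeil_eq cc cpl hcpl]
  have hbr := Int.ediv_mul_le (cc + cpl - 1) (by omega : cpl ≠ 0)
  set v : Int := (cc + cpl - 1) / cpl with hvdef
  have hNeq : (if 0 < L then ((L - 0 + 1 - 1) / 1).toNat else 0) = (if 0 < cc then ((cc - 0 + cpl - 1) / cpl).toNat else 0) := by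
    rw [show L - 0 + 1 - 1 = L from by ring, show cc - 0 + cpl - 1 = cc + cpl - 1 from by ring,
        Int.ediv_one, hL, ← hvdef]
    by_cases h0 : 0 < cc
    · have hv1 : 1 ≤ v := by rw [hvdef]; exact (Int.le_ediv_iff_mul_le hcpl).mpr (by omega)
      rw [if_pos (by omega : (0:Int) < v), if_pos h0]
    · have hv0 : v = 0 := by rw [hvdef]; exact Int.ediv_eq_zero_of_lt (by omega) (by omega)
      rw [if_neg (by omega : ¬ (0:Int) < v), if_neg h0]
  rw [hNeq]
  congr 1
  congr 1
  apply List.map_congr_left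
  intro k hk
  dsimp only [Function.comp]
  simp only [zero_add, one_mul]
  rw [mul_comm cpl ((k : Int))]
  have hk' : k < (if 0 < cc then v.toNat else 0) := by
    have := List.mem_range.mp hk
    simpa using this
  have h0cc : 0 < cc := by by_contra h; rw [if_neg h] at hk'; omega
  rw [if_pos h0cc] at hk'
  have hkv : (k : Int) ≤ v - 1 := by omega
  have hkcpl : (k : Int) * cpl ≤ (v - 1) * cpl := mul_le_mul_of_nonneg_right hkv (le_of_lt hcpl)
  have hlt : (k : Int) * cpl < cc := by nlinarith
  exact pvBlock_eq x chunks hchunks cpl hcpl (k : Int) (by positivity) hlt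

-- ===== B-side lemmas =====

-- chunk count as a ceiling
theorem pvChunkLen (x : List Char) :
    ((pvA_chunkify x 4).length : Int) = if 0 < (x.length : Int) then ((x.length : Int) + 3) / 4 else 0 := by
  unfold pvA_chunkify
  rw [PySem.List.pyRange_of_pos 0 (x.length : Int) (by norm_num : (0:Int) < 4)]
  simp only [List.length_map, List.length_range]
  split_ifs with h
  · rw [Int.toNat_of_nonneg (by omega)]
    omega
  · simp

-- the chunk list, elementwise
def pvK (x : List Char) : Nat := if 0 < (x.length : Int) then (((x.length : Int) - 0 + 4 - 1) / 4).toNat else 0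

theorem pvChunkify_eq (x : List Char) :
    pvA_chunkify x 4 = (List.range (pvK x)).map (fun k => (x.drop (4 * k)).take 4) := by
  unfold pvA_chunkify pvK
  rw [PySem.List.pyRange_of_pos 0 (x.length : Int) (by norm_num : (0:Int) < 4), List.map_map]
  apply List.map_congr_left
  intro k _
  simp only [Function.comp_def]
  rw [PySem.List.slice_toNat x (a := 0 + 4 * (k:Int)) (b := 0 + 4 * (k:Int) + 4) (by omega) (by omega)]
  have e1 : ((0:Int) + 4 * (k:Int)).toNat = 4 * k := by omega
  have e2 : ((0:Int) + 4 * (k:Int) + 4).toNat - 4 * k = 4 := by omega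
  rw [e1, e2]

-- ceiling-count arithmetic for one line
theorem pvKarith (L C G : Int) (hC : 1 ≤ C) (hG : 0 ≤ G) (hlt : 4 * G < L) :
    (min (4 * C) (L - 4 * G) + 3) / 4 = min (G + C) ((L + 3) / 4) - G := by
  rcases le_total (4 * C) (L - 4 * G) with hca | hca
  · rw [min_eq_left hca]
    have h1 : (4 * C + 3) / 4 = C := by
      rw [show (4 : Int) * C + 3 = 3 + C * 4 from by ring, Int.add_mul_ediv_right _ _ (by norm_num)]
      norm_num
    have h2 : G + C ≤ (L + 3) / 4 := (Int.le_ediv_iff_mul_le (by norm_num)).mpr (by nlinarith)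
    rw [h1, min_eq_left h2]
    ring
  · rw [min_eq_right hca]
    have h2 : (L + 3) / 4 ≤ G + C := by
      have := Int.ediv_le_ediv (by norm_num : (0:Int) < 4) (show L + 3 ≤ 4 * (G + C) + 3 from by nlinarith)
      calc (L + 3) / 4 ≤ (4 * (G + C) + 3) / 4 := this
        _ = G + C := by
          rw [show (4 : Int) * (G + C) + 3 = 3 + (G + C) * 4 from by ring,
            Int.add_mul_ediv_right _ _ (by norm_num)]
          norm_num
    rw [min_eq_right h2]
    rw [show L - 4 * G + 3 = L + 3 + (-G) * 4 from by ring, Int.add_mul_ediv_right _ _ (by norm_num)]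
    ring

-- the k-th chunk of a line's slice of text is the (a*cpl+k)-th chunk of the whole text
theorem pvSeg_chunk (x : List Char) (cpl : Int) (hcpl : 1 ≤ cpl) (a k : Nat)
    (hk : 4 * k + 4 ≤ (4 * cpl).toNat)
    (hin : (4 * cpl).toNat * a + 4 * k < x.length) :
    PySem.List.slice ((x.drop ((4 * cpl).toNat * a)).take (4 * cpl).toNat)
        (some (0 + 4 * (k : Int))) (some (0 + 4 * (k : Int) + 4))
      = PySem.List.pyGetD (pvA_chunkify x 4) ((a : Int) * cpl + 1 * (k : Int)) [] := by
  set cplN := cpl.toNat with hcplN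
  have hc : cpl = (cplN : Int) := by omega
  have hspN : (4 * cpl).toNat = 4 * cplN := by omega
  set t := (x.drop ((4 * cpl).toNat * a)).take (4 * cpl).toNat with ht
  -- left side: drop/take arithmetic
  rw [PySem.List.slice_toNat t (a := 0 + 4 * (k : Int)) (b := 0 + 4 * (k : Int) + 4) (by omega) (by omega)]
  have e1 : ((0 : Int) + 4 * (k : Int)).toNat = 4 * k := by omega
  have e2 : ((0 : Int) + 4 * (k : Int) + 4).toNat - 4 * k = 4 := by omega
  rw [e1, e2, ht, List.drop_take, List.drop_drop, List.take_take]
  rw [min_eq_left (by omega : 4 ≤ (4 * cpl).toNat - 4 * k)]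
  -- right side: pyGetD on the chunk list
  have hgj : (a : Int) * cpl + 1 * (k : Int) = ((a * cplN + k : Nat) : Int) := by
    rw [hc]; push_cast; ring
  rw [hgj]
  have hx0 : 0 < x.length := by omega
  rw [hspN] at hin
  have hJ : 4 * cplN * a = 4 * (a * cplN) := by ring
  have hK : a * cplN + k < pvK x := by
    unfold pvK
    rw [if_pos (by exact_mod_cast hx0 : (0:Int) < (x.length:Int))]
    omega
  have hlenK : (pvA_chunkify x 4).length = pvK x := by rw [pvChunkify_eq]; simp
  rw [PySem.List.pyGetD_eq_getElem _ _ (by positivity) (by rw [hlenK]; exact_mod_cast hK)]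
  simp only [pvChunkify_eq, List.getElem_map, List.getElem_range, Int.toNat_natCast]
  congr 1
  rw [hspN]
  ring

-- the single-line block equals the canonical block
set_option maxHeartbeats 1000000 in
theorem pvLine_eq (x : List Char) (cpl : Int) (hcpl : 1 ≤ cpl) (a : Nat)
    (hlt : (4 * cpl).toNat * a < x.length) :
    pvB_lineBlock ((x.drop ((4 * cpl).toNat * a)).take (4 * cpl).toNat) (4 * cpl * (a : Int))
      = pvB_block x (pvA_chunkify x 4) 4 cpl "  ".toList ((a : Int) * cpl) := by
  set cplN := cpl.toNat with hcplN
  have hc : cpl = (cplN : Int) := by omega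
  have hspN : (4 * cpl).toNat = 4 * cplN := by omega
  set chunks := pvA_chunkify x 4 with hchdef
  set t := (x.drop ((4 * cpl).toNat * a)).take (4 * cpl).toNat with ht
  have hlt' : 4 * cplN * a < x.length := by rw [hspN] at hlt; exact hlt
  have hT : t.length = min (4 * cplN) (x.length - 4 * cplN * a) := by
    rw [ht, hspN]; simp [List.length_take, List.length_drop]
  have hx0 : 0 < x.length := by omega
  set g : Int := (a : Int) * cpl with hg
  have hG : 4 * g = ((4 * cplN * a : Nat) : Int) := by rw [hg, hc]; push_cast; ring
  have hcc : ((chunks.length : Nat) : Int) = ((x.length : Int) + 3) / 4 := by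
    rw [hchdef, pvChunkLen, if_pos (by exact_mod_cast hx0)]
  have hTi : ((t.length : Nat) : Int) = min (4 * cpl) ((x.length : Int) - 4 * g) := by
    rw [hT]
    push_cast [Nat.cast_sub (le_of_lt hlt')]
    rw [← hc, hg]
    ring_nf
  have hg4 : 4 * g < (x.length : Int) := by omega
  have hcount : ((t.length : Int) + 3) / 4 = min (g + cpl) (chunks.length : Int) - g := by
    rw [hTi, hcc]
    exact pvKarith (x.length : Int) cpl g hcpl (by positivity) hg4
  have hTpos : 0 < t.length := by omega
  have hge : g < min (g + cpl) (chunks.length : Int) := by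
    have : 1 ≤ ((t.length : Int) + 3) / 4 := by omega
    omega
  -- the two index ranges have the same number of entries
  have hKC : (if 0 < (t.length : Int) then (((t.length : Int) - 0 + 4 - 1) / 4).toNat else 0)
      = (if g < min (g + cpl) (chunks.length : Int) then
          ((min (g + cpl) (chunks.length : Int) - g + 1 - 1) / 1).toNat else 0) := by
    rw [if_pos (by exact_mod_cast hTpos), if_pos hge]
    congr 1
    rw [show ((t.length : Int) - 0 + 4 - 1) = (t.length : Int) + 3 from by ring,
        show (min (g + cpl) (chunks.length : Int) - g + 1 - 1) = min (g + cpl) (chunks.length : Int) - g from by ring,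
        Int.ediv_one, hcount]
  -- the per-element facts needed by pvSeg_chunk
  have helt : ∀ k : Nat, k < (((t.length : Int) - 0 + 4 - 1) / 4).toNat →
      (4 * k + 4 ≤ (4 * cpl).toNat ∧ (4 * cpl).toNat * a + 4 * k < x.length) := by
    intro k hk
    rw [hspN]
    omega
  have hifpos : ∀ {α : Type} (u v : α), (if 0 < ((t.length : Nat) : Int) then u else v) = u := by
    intro α u v
    rw [if_pos (by exact_mod_cast hTpos)]
  -- lower line: the chunk slices of t are the chunks of the group
  have hlow : (PySem.List.pyRange 0 (t.length : Int) 4).map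
        (fun i => PySem.List.slice t (some i) (some (i + 4)))
      = (PySem.List.pyRange g (min (g + cpl) (chunks.length : Int)) 1).map
        (fun m => PySem.List.pyGetD chunks m []) := by
    rw [PySem.List.pyRange_of_pos _ _ (by norm_num : (0:Int) < 4),
        PySem.List.pyRange_of_pos _ _ (by norm_num : (0:Int) < 1),
        List.map_map, List.map_map]
    rw [← hKC, hifpos]
    apply List.map_congr_left
    intro k hk
    have hk' := (helt k (List.mem_range.mp hk))
    simp only [Function.comp_def]
    rw [ht, hchdef]
    exact pvSeg_chunk x cpl hcpl a k hk'.1 hk'.2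
  -- upper line: the marks over t are the numbered underscore runs of the group
  have hup : (PySem.List.pyRange 0 (t.length : Int) 4).map
        (fun i => pvB_mark (4 * cpl * (a : Int) + i) (PySem.List.slice t (some i) (some (i + 4))).length)
      = (PySem.List.pyRange g (min (g + cpl) (chunks.length : Int)) 1).map
        (fun m => pvB_numOver (PySem.Int.toChars (m * 4 + 1)) (PySem.List.pyGetD chunks m []).length) := by
    rw [PySem.List.pyRange_of_pos _ _ (by norm_num : (0:Int) < 4),
        PySem.List.pyRange_of_pos _ _ (by norm_num : (0:Int) < 1),
        List.map_map, List.map_map]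
    rw [← hKC, hifpos]
    apply List.map_congr_left
    intro k hk
    have hk' := (helt k (List.mem_range.mp hk))
    simp only [Function.comp_def]
    rw [ht, hchdef]
    rw [pvSeg_chunk x cpl hcpl a k hk'.1 hk'.2]
    show pvB_numOver (PySem.Int.toChars (4 * cpl * (a : Int) + (0 + 4 * (k : Int)) + 1)) _ = _
    congr 2
    rw [hg]
    ring
  -- assemble the block
  unfold pvB_lineBlock pvB_block
  dsimp only
  rw [pvGroup_eq chunks g cpl (by positivity) (by omega)]
  rw [pvEnum_map_pyRange]
  simp only [List.map_map, Function.comp_def]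
  rw [PySem.List.foldl_prod_mk
      (f := fun acc i => acc ++ [pvB_mark (4 * cpl * (a : Int) + i) (PySem.List.slice t (some i) (some (i + 4))).length])
      (g := fun acc i => acc ++ [PySem.List.slice t (some i) (some (i + 4))])]
  dsimp only
  rw [PySem.List.foldl_append_singleton_eq_map, PySem.List.foldl_append_singleton_eq_map]
  dsimp only [List.nil_append]
  have hargU : ((PySem.List.pyRange g (min (g + cpl) (chunks.length : Int)) 1).map
        (fun m => pvB_numOver (PySem.Int.toChars ((g + (0 + (m - g))) * 4 + 1)) (PySem.List.pyGetD chunks m []).length))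
      = ((PySem.List.pyRange g (min (g + cpl) (chunks.length : Int)) 1).map
        (fun m => pvB_numOver (PySem.Int.toChars (m * 4 + 1)) (PySem.List.pyGetD chunks m []).length)) := by
    apply List.map_congr_left
    intro m _
    congr 2
    ring
  rw [hargU, hlow, hup]
  have hnum1 : 4 * cpl * (a : Int) + 1 = g * 4 + 1 := by rw [hg]; ring
  have hnum2 : 4 * cpl * (a : Int) + (t.length : Int) = min (x.length : Int) ((g + cpl) * 4) := by
    rw [hTi]
    rcases le_total (4 * cpl) ((x.length : Int) - 4 * g) with hmin | hmin
    · rw [min_eq_left hmin, min_eq_right (by rw [hg] at hmin ⊢; nlinarith)]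
      rw [hg]; ring
    · rw [min_eq_right hmin, min_eq_left (by rw [hg] at hmin ⊢; nlinarith)]
      rw [hg]; ring
  rw [hnum1, hnum2]

-- exact value of a ceiling division
theorem pvCeilDiv (L d k : Int) (hd : 0 < d) (h1 : d * (k - 1) < L) (h2 : L ≤ d * k) :
    (L + d - 1) / d = k := by
  have hle : k ≤ (L + d - 1) / d := (Int.le_ediv_iff_mul_le hd).mpr (by nlinarith)
  have hub : ((L + d - 1) / d) * d ≤ L + d - 1 := Int.ediv_mul_le _ (by omega)
  by_contra hne
  have hk1 : k + 1 ≤ (L + d - 1) / d := by omega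
  have := mul_le_mul_of_nonneg_right hk1 (le_of_lt hd)
  nlinarith

-- the divide-and-conquer recursion produces exactly the blocks of lines a..b-1
set_option maxHeartbeats 1000000 in
theorem pvFmt_seg (x : List Char) (cpl : Int) (hcpl : 1 ≤ cpl) (a b : Nat)
    (hb : a < b → 4 * cpl * ((b : Int) - 1) < (x.length : Int)) :
    pvB_fmt ((x.drop ((4 * cpl).toNat * a)).take ((4 * cpl).toNat * (b - a))) (4 * cpl * (a : Int)) (4 * cpl)
      = (((List.range (b - a)).map (fun j => pvB_block x (pvA_chunkify x 4) 4 cpl "  ".toList (((a + j : Nat) : Int) * cpl)))).flatten := by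
  rcases Nat.lt_or_ge a b with hab | hab
  case inr =>
    have h0 : b - a = 0 := by omega
    rw [h0]
    simp only [Nat.mul_zero, List.take_zero, List.range_zero, List.map_nil, List.flatten_nil]
    rw [pvB_fmt]
    simp
  case inl =>
    have hb' := hb hab
    have hspI : (((4 * cpl).toNat : Nat) : Int) = 4 * cpl := by omega
    have hsp4 : 4 ≤ (4 * cpl).toNat := by omega
    have hA : (((4 * cpl).toNat * a : Nat) : Int) = 4 * cpl * (a : Int) := by push_cast; rw [hspI]
    have hxa : (4 * cpl).toNat * a < x.length := by
      have h1 : (4:Int) * cpl * (a:Int) ≤ 4 * cpl * ((b:Int) - 1) :=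
        mul_le_mul_of_nonneg_left (by omega) (by positivity)
      omega
    by_cases hone : b = a + 1
    · subst hone
      simp only [Nat.add_sub_cancel_left, Nat.mul_one]
      rw [pvB_fmt]
      have ht0 : (x.drop ((4 * cpl).toNat * a)).take (4 * cpl).toNat ≠ [] := by
        apply List.ne_nil_of_length_pos
        simp only [List.length_take, List.length_drop]
        omega
      have hfit : (((x.drop ((4 * cpl).toNat * a)).take (4 * cpl).toNat).length : Int) ≤ 4 * cpl := by
        simp only [List.length_take, List.length_drop]
        omega
      rw [dif_neg ht0, dif_pos hfit]
      rw [pvLine_eq x cpl hcpl a hxa]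
      simp
    · -- at least two lines: split in the middle
      have hab2 : a + 2 ≤ b := by omega
      set h := (b - a) / 2 with hhdef
      have hh1 : 1 ≤ h := by omega
      have hh2 : h < b - a := by omega
      set t := (x.drop ((4 * cpl).toNat * a)).take ((4 * cpl).toNat * (b - a)) with ht
      have htlen : t.length = min ((4 * cpl).toNat * (b - a)) (x.length - (4 * cpl).toNat * a) := by
        rw [ht]; simp [List.length_take, List.length_drop]
      have hBA : (((4 * cpl).toNat * (b - a) : Nat) : Int) = 4 * cpl * ((b:Int) - (a:Int)) := by
        push_cast [Nat.cast_sub hab.le]; rw [hspI]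
      have hstep : 4 * cpl * ((a:Int) + 1) ≤ 4 * cpl * ((b:Int) - 1) :=
        mul_le_mul_of_nonneg_left (by omega) (by positivity)
      have hstepr : 4 * cpl * ((a:Int) + 1) = 4 * cpl * (a:Int) + 4 * cpl := by ring
      have htl_int : (t.length : Int) = min (4 * cpl * ((b:Int) - (a:Int))) ((x.length : Int) - 4 * cpl * (a:Int)) := by
        rw [htlen]
        push_cast [Nat.cast_min, Nat.cast_sub (le_of_lt hxa)]
        rw [← hBA, ← hA]
        push_cast
        ring_nf
      have hBA2 : 4 * cpl * ((b:Int) - (a:Int)) = 4 * cpl * ((b:Int) - 1) - 4 * cpl * (a:Int) + 4 * cpl := by ring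
      have hD : (0:Int) < 4 * cpl := by positivity
      have hDBA : 4 * cpl ≤ 4 * cpl * ((b:Int) - (a:Int)) - 4 * cpl := by nlinarith [mul_le_mul_of_nonneg_left (show (2:Int) ≤ (b:Int) - (a:Int) from by omega) (le_of_lt hD)]
      have hu : (4 * cpl).toNat ≤ (4 * cpl).toNat * (b - a) := Nat.le_mul_of_pos_right _ (by omega)
      have ht0 : t ≠ [] := by
        apply List.ne_nil_of_length_pos
        omega
      have htbig : ¬ ((t.length : Int) ≤ 4 * cpl) := by omega
      rw [pvB_fmt]
      rw [dif_neg ht0, dif_neg htbig, dif_neg (by omega : ¬ (4 * cpl ≤ 0))]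
      dsimp only
      have hx1 : 4 * cpl * (((b:Int) - (a:Int)) - 1) = 4 * cpl * ((b:Int) - (a:Int)) - 4 * cpl := by ring
      have hx2 : 4 * cpl * (a:Int) + 4 * cpl * ((b:Int) - (a:Int)) - 4 * cpl = 4 * cpl * ((b:Int) - 1) := by ring
      -- the line count of the segment is b - a
      have hlines : -(PySem.Int.floordiv (-(t.length : Int)) (4 * cpl)) = (((b - a : Nat)) : Int) := by
        rw [pvCeil_eq _ _ hD]
        push_cast [Nat.cast_sub hab.le]
        apply pvCeilDiv _ _ _ hD
        · omega
        · omega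
      rw [hlines, PySem.Int.floordiv_eq_ediv_of_pos (by norm_num : (0:Int) < 2)]
      have hdiv2 : (((b - a : Nat)) : Int) / 2 = ((h : Nat) : Int) := by omega
      rw [hdiv2]
      have hmid : ((h : Nat) : Int) * (4 * cpl) = (((4 * cpl).toNat * h : Nat) : Int) := by
        push_cast; rw [hspI]; ring
      rw [hmid, Int.toNat_natCast]
      -- the two halves are the segments (a, a+h) and (a+h, b)
      have htake : t.take ((4 * cpl).toNat * h)
          = (x.drop ((4 * cpl).toNat * a)).take ((4 * cpl).toNat * ((a + h) - a)) := by
        rw [ht, List.take_take]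
        congr 1
        rw [show (a + h) - a = h from by omega]
        exact Nat.min_eq_left (Nat.mul_le_mul_left _ (le_of_lt hh2))
      have hdrop : t.drop ((4 * cpl).toNat * h)
          = (x.drop ((4 * cpl).toNat * (a + h))).take ((4 * cpl).toNat * (b - (a + h))) := by
        rw [ht, List.drop_take, List.drop_drop]
        rw [show (4 * cpl).toNat * a + (4 * cpl).toNat * h = (4 * cpl).toNat * (a + h) from by
          rw [Nat.mul_add]]
        congr 1
        rw [← Nat.mul_sub]
        congr 1
        omega
      have hoff : 4 * cpl * (a : Int) + (((4 * cpl).toNat * h : Nat) : Int) = 4 * cpl * ((a + h : Nat) : Int) := by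
        push_cast; rw [hspI]; ring
      rw [htake, hdrop, hoff]
      rw [pvFmt_seg x cpl hcpl a (a + h) (fun _ => by
        calc 4 * cpl * (((a + h : Nat) : Int) - 1) ≤ 4 * cpl * ((b:Int) - 1) :=
              mul_le_mul_of_nonneg_left (by push_cast; omega) (by positivity)
          _ < (x.length : Int) := hb')]
      rw [pvFmt_seg x cpl hcpl (a + h) b (fun _ => hb')]
      -- recombine the two block lists
      rw [show (a + h) - a = h from by omega]
      rw [show b - a = h + (b - (a + h)) from by omega, List.range_add, List.map_append,
        List.flatten_append, List.map_map]
      congr 1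
      apply congrArg List.flatten
      apply List.map_congr_left
      intro j _
      simp only [Function.comp_def]
      rw [Nat.add_assoc]
termination_by b - a
decreasing_by
  all_goals omega

-- B equals the canonical block list
theorem pvB_eq_sliced (s : String) (w : Int) :
    format_numbers_above_alt s w = String.ofList (pvSliced s.toList w) := by
  unfold format_numbers_above_alt pvSliced
  dsimp only
  set x := s.toList with hx
  set cpl : Int := max 1 (PySem.Int.floordiv (w - 11) 6) with hcpl
  have hcpl1 : 1 ≤ cpl := le_max_left _ _
  set chunks := pvA_chunkify x 4 with hch
  congr 1
  rw [PySem.List.pyRange_of_pos 0 (chunks.length : Int) (by omega : (0:Int) < cpl), List.map_map]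
  simp only [sub_zero, zero_add]
  by_cases h0 : x.length = 0
  · have hxnil : x = [] := List.length_eq_zero_iff.mp h0
    have hcc0 : ((chunks.length : Nat) : Int) = 0 := by
      rw [hch, pvChunkLen]
      simp [h0]
    rw [if_neg (by omega)]
    rw [hxnil, pvB_fmt, dif_pos rfl]
    simp
  · have hx0 : 0 < x.length := Nat.pos_of_ne_zero h0
    have hccI : ((chunks.length : Nat) : Int) = ((x.length : Int) + 3) / 4 := by
      rw [hch, pvChunkLen, if_pos (by exact_mod_cast hx0)]
    have hccpos : 0 < ((chunks.length : Nat) : Int) := by omega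
    rw [if_pos hccpos]
    set q : Int := (((chunks.length : Nat) : Int) + cpl - 1) / cpl with hq
    have hub : q * cpl ≤ ((chunks.length : Nat) : Int) + cpl - 1 := Int.ediv_mul_le _ (by omega)
    have hlb : ((chunks.length : Nat) : Int) ≤ q * cpl := by
      have h1 := Int.lt_ediv_add_one_mul_self (((chunks.length : Nat) : Int) + cpl - 1) (by omega : 0 < cpl)
      rw [← hq] at h1
      have h2 : (q + 1) * cpl = q * cpl + cpl := by ring
      omega
    have hq1 : 1 ≤ q := (Int.le_ediv_iff_mul_le (by omega)).mpr (by omega)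
    have hNq : ((q.toNat : Nat) : Int) = q := Int.toNat_of_nonneg (by omega)
    have hCast : (((4 * cpl).toNat * q.toNat : Nat) : Int) = 4 * (q * cpl) := by
      push_cast
      rw [show (((4 * cpl).toNat : Nat) : Int) = 4 * cpl from by omega, hNq]
      ring
    have hcover : x.length ≤ (4 * cpl).toNat * q.toNat := by omega
    have hseg : (x.drop ((4 * cpl).toNat * 0)).take ((4 * cpl).toNat * (q.toNat - 0)) = x := by
      simp only [Nat.mul_zero, List.drop_zero, Nat.sub_zero]
      exact List.take_of_length_le hcover
    have hbN : 0 < q.toNat → 4 * cpl * ((q.toNat : Int) - 1) < (x.length : Int) := by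
      intro _
      have h3 : (q - 1) * cpl = q * cpl - cpl := by ring
      have h4 : 4 * cpl * ((q.toNat : Int) - 1) = 4 * ((q - 1) * cpl) := by rw [hNq]; ring
      omega
    rw [show pvB_fmt x 0 (4 * cpl)
        = pvB_fmt ((x.drop ((4 * cpl).toNat * 0)).take ((4 * cpl).toNat * (q.toNat - 0)))
            (4 * cpl * ((0 : Nat) : Int)) (4 * cpl) from by rw [hseg]; norm_num]
    rw [pvFmt_seg x cpl hcpl1 0 q.toNat (fun hq0 => hbN hq0)]
    rw [Nat.sub_zero]
    apply congrArg List.flatten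
    apply List.map_congr_left
    intro j _
    simp only [Function.comp_def]
    congr 1
    push_cast
    ring

-- ===== VERDICT (by name: the statement is the Claim_ definition above) =====
theorem format_numbers_above_spec : Claim_equal_format_numbers_above := by
  intro s w _
  unfold Spec_format_numbers_above
  rw [pvA_eq_sliced, pvB_eq_sliced]
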